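-- pv_equiv track=rewrite | github.com/ruiyeshi/defi_protocol_security | run_slither_defi_from_cache.py | rewrite_known_imports
-- ===== SOURCE A (Python) =====
-- from typing import Dict, Optional, Tuple, List
--
-- _OZ_IMPORT_REWRITES: List[Tuple[str, str]] = [
--     # OpenZeppelin proxy (flattened files often keep relative paths that no longer match)
--     ("../ERC1967/ERC1967Proxy.sol", "@openzeppelin/contracts/proxy/ERC1967/ERC1967Proxy.sol"),
--     ("../ERC1967/ERC1967Upgrade.sol", "@openzeppelin/contracts/proxy/ERC1967/ERC1967Upgrade.sol"),
--     ("../beacon/IBeacon.sol", "@openzeppelin/contracts/proxy/beacon/IBeacon.sol"),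
--     ("../Proxy.sol", "@openzeppelin/contracts/proxy/Proxy.sol"),
--     ("./ProxyAdmin.sol", "@openzeppelin/contracts/proxy/transparent/ProxyAdmin.sol"),
--     ("./TransparentUpgradeableProxy.sol", "@openzeppelin/contracts/proxy/transparent/TransparentUpgradeableProxy.sol"),
--
--     # OpenZeppelin access/utils
--     ("../../access/Ownable.sol", "@openzeppelin/contracts/access/Ownable.sol"),
--     ("access/Ownable.sol", "@openzeppelin/contracts/access/Ownable.sol"),
--     ("../utils/Context.sol", "@openzeppelin/contracts/utils/Context.sol"),
--     ("utils/Context.sol", "@openzeppelin/contracts/utils/Context.sol"),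
--     ("../../utils/Address.sol", "@openzeppelin/contracts/utils/Address.sol"),
--     ("utils/Address.sol", "@openzeppelin/contracts/utils/Address.sol"),
--     ("../../utils/StorageSlot.sol", "@openzeppelin/contracts/utils/StorageSlot.sol"),
--     ("utils/StorageSlot.sol", "@openzeppelin/contracts/utils/StorageSlot.sol"),
--
--     # OpenZeppelin interfaces
--     ("../../interfaces/IERC1967.sol", "@openzeppelin/contracts/interfaces/IERC1967.sol"),
--
--     # OpenZeppelin math utils (seen in some flattened utils bundles)
--     ("./math/Math.sol", "@openzeppelin/contracts/utils/math/Math.sol"),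
--     ("./math/SignedMath.sol", "@openzeppelin/contracts/utils/math/SignedMath.sol"),
-- ]
--
-- def rewrite_known_imports(sol_source: str) -> str:
--     """Rewrite a few high-frequency relative import paths into canonical package imports.
--
--     This helps when Etherscan provides a *single* flattened file that still contains
--     OpenZeppelin-style relative imports (e.g., ../ERC1967/...), which break because
--     the file is saved as contract.sol at the workdir root.
--
--     The rewrites are conservative: only exact string matches inside import directives
--     are replaced.
--     """
--     if not sol_source:
--         return sol_source
--
--     out = sol_source
--     for old, new in _OZ_IMPORT_REWRITES:
--         # Replace only inside import quotes; simple and effective for these exact patterns.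
--         out = out.replace(f'"{old}"', f'"{new}"')
--         out = out.replace(f"'{old}'", f"'{new}'")
--     return out
-- ===== SOURCE B (Python) =====
-- import re
-- from typing import Dict, List, Tuple
--
-- _OZ_IMPORT_REWRITES: List[Tuple[str, str]] = [
--     ("../ERC1967/ERC1967Proxy.sol", "@openzeppelin/contracts/proxy/ERC1967/ERC1967Proxy.sol"),
--     ("../ERC1967/ERC1967Upgrade.sol", "@openzeppelin/contracts/proxy/ERC1967/ERC1967Upgrade.sol"),
--     ("../beacon/IBeacon.sol", "@openzeppelin/contracts/proxy/beacon/IBeacon.sol"),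
--     ("../Proxy.sol", "@openzeppelin/contracts/proxy/Proxy.sol"),
--     ("./ProxyAdmin.sol", "@openzeppelin/contracts/proxy/transparent/ProxyAdmin.sol"),
--     ("./TransparentUpgradeableProxy.sol", "@openzeppelin/contracts/proxy/transparent/TransparentUpgradeableProxy.sol"),
--     ("../../access/Ownable.sol", "@openzeppelin/contracts/access/Ownable.sol"),
--     ("access/Ownable.sol", "@openzeppelin/contracts/access/Ownable.sol"),
--     ("../utils/Context.sol", "@openzeppelin/contracts/utils/Context.sol"),
--     ("utils/Context.sol", "@openzeppelin/contracts/utils/Context.sol"),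
--     ("../../utils/Address.sol", "@openzeppelin/contracts/utils/Address.sol"),
--     ("utils/Address.sol", "@openzeppelin/contracts/utils/Address.sol"),
--     ("../../utils/StorageSlot.sol", "@openzeppelin/contracts/utils/StorageSlot.sol"),
--     ("utils/StorageSlot.sol", "@openzeppelin/contracts/utils/StorageSlot.sol"),
--     ("../../interfaces/IERC1967.sol", "@openzeppelin/contracts/interfaces/IERC1967.sol"),
--     ("./math/Math.sol", "@openzeppelin/contracts/utils/math/Math.sol"),
--     ("./math/SignedMath.sol", "@openzeppelin/contracts/utils/math/SignedMath.sol"),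
-- ]
--
-- # One table of quoted-pattern -> quoted-replacement, and one regex alternating
-- # over all quoted patterns: a single pass does every rewrite at once.
-- _TABLE: Dict[str, str] = {}
-- for _old, _new in _OZ_IMPORT_REWRITES:
--     _TABLE[f'"{_old}"'] = f'"{_new}"'
--     _TABLE[f"'{_old}'"] = f"'{_new}'"
-- _RX = re.compile("|".join(re.escape(_k) for _k in _TABLE))
--
--
-- def rewrite_known_imports(sol_source: str) -> str:
--     if not sol_source:
--         return sol_source
--     return _RX.sub(lambda m: _TABLE[m.group(0)], sol_source)
-- ===== Notes on version B (the rewrite author's own statement) =====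
-- stated objective: idiomatic
-- what changed: Replaced the 34 sequential full-string str.replace passes by one precomputed pattern->replacement table plus a single compiled regex alternation over the quoted patterns, so the source is scanned once with a callback doing the table lookup.
import Mathlib
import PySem

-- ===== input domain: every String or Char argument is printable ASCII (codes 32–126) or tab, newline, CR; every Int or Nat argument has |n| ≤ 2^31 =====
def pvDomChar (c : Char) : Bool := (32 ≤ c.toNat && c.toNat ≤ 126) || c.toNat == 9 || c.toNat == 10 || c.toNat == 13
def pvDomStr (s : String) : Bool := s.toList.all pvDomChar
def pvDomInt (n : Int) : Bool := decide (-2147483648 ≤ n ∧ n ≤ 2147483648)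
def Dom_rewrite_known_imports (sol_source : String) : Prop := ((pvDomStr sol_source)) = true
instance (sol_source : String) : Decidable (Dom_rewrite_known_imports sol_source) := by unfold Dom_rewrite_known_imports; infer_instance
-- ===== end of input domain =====

-- B replaces A's 34 sequential full-string str.replace passes by one precomputed
-- pattern→replacement table and a single scan (a compiled regex alternation in Python).
-- Equivalence is about the RETURN value; neither function has side effects.

-- module constant _OZ_IMPORT_REWRITES (shared by both ports, like the Python module constant)
def ozRewrites : List (String × String) := [
  ("../ERC1967/ERC1967Proxy.sol", "@openzeppelin/contracts/proxy/ERC1967/ERC1967Proxy.sol"),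
  ("../ERC1967/ERC1967Upgrade.sol", "@openzeppelin/contracts/proxy/ERC1967/ERC1967Upgrade.sol"),
  ("../beacon/IBeacon.sol", "@openzeppelin/contracts/proxy/beacon/IBeacon.sol"),
  ("../Proxy.sol", "@openzeppelin/contracts/proxy/Proxy.sol"),
  ("./ProxyAdmin.sol", "@openzeppelin/contracts/proxy/transparent/ProxyAdmin.sol"),
  ("./TransparentUpgradeableProxy.sol", "@openzeppelin/contracts/proxy/transparent/TransparentUpgradeableProxy.sol"),
  ("../../access/Ownable.sol", "@openzeppelin/contracts/access/Ownable.sol"),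
  ("access/Ownable.sol", "@openzeppelin/contracts/access/Ownable.sol"),
  ("../utils/Context.sol", "@openzeppelin/contracts/utils/Context.sol"),
  ("utils/Context.sol", "@openzeppelin/contracts/utils/Context.sol"),
  ("../../utils/Address.sol", "@openzeppelin/contracts/utils/Address.sol"),
  ("utils/Address.sol", "@openzeppelin/contracts/utils/Address.sol"),
  ("../../utils/StorageSlot.sol", "@openzeppelin/contracts/utils/StorageSlot.sol"),
  ("utils/StorageSlot.sol", "@openzeppelin/contracts/utils/StorageSlot.sol"),
  ("../../interfaces/IERC1967.sol", "@openzeppelin/contracts/interfaces/IERC1967.sol"),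
  ("./math/Math.sol", "@openzeppelin/contracts/utils/math/Math.sol"),
  ("./math/SignedMath.sol", "@openzeppelin/contracts/utils/math/SignedMath.sol")]

-- ===== PORT A =====
def rewrite_known_imports (sol_source : String) : String :=
  if sol_source == "" then sol_source
  else ozRewrites.foldl (fun out pr =>
    PySem.Str.replace
      (PySem.Str.replace out ("\"" ++ pr.1 ++ "\"") ("\"" ++ pr.2 ++ "\""))
      ("'" ++ pr.1 ++ "'") ("'" ++ pr.2 ++ "'")) sol_source

-- ===== PORT B =====
-- B's table: each quoted pattern (both quote kinds) mapped to its quoted replacement,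
-- in the dict-build order of Source B (pairs as char lists).
def qpats : List (List Char × List Char) :=
  ozRewrites.flatMap (fun pr =>
    [('"' :: pr.1.toList ++ ['"'], '"' :: pr.2.toList ++ ['"']),
     ('\'' :: pr.1.toList ++ ['\''], '\'' :: pr.2.toList ++ ['\''])])

-- needed by the termination proofs of subScan (and of the proof-side helpers below)
lemma qpats_fst_len : ∀ pr ∈ qpats, 1 ≤ pr.1.length := by decide

-- the single regex pass of Source B: leftmost match of the alternation (at most one
-- alternative matches at a position), replaced via the table; non-matching chars copied
def subScan : List Char → List Char
  | [] => []
  | c :: t =>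
    match h : qpats.find? (fun pr => pr.1.isPrefixOf (c :: t)) with
    | some pr => pr.2 ++ subScan ((c :: t).drop pr.1.length)
    | none => c :: subScan t
termination_by l => l.length
decreasing_by
  · have h1 := qpats_fst_len _ (List.mem_of_find?_eq_some h)
    simp only [List.length_drop, List.length_cons]
    omega
  · simp

def rewrite_known_imports_alt (sol_source : String) : String :=
  if sol_source == "" then sol_source
  else String.ofList (subScan sol_source.toList)

-- ===== PRECONDITION & SPEC =====
-- Pre_ excludes inputs where one known quoted pattern occurrence starts at the closing
-- quote of another occurrence (overlapping matches): there A's later sequential passes can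
-- cascade across the shared quote, a defensible-corner artefact of pass ordering that the
-- single-pass B (equally defensibly) does not reproduce.
def Pre_rewrite_known_imports (sol_source : String) : Prop :=
  ∀ i < sol_source.toList.length, ∀ p ∈ qpats, ∀ q ∈ qpats,
    p.1.isPrefixOf (sol_source.toList.drop i) = true →
    q.1.isPrefixOf (sol_source.toList.drop (i + p.1.length - 1)) = false
instance (sol_source : String) : Decidable (Pre_rewrite_known_imports sol_source) := by
  unfold Pre_rewrite_known_imports; infer_instance

def pvWitness_rewrite_known_imports : String := "import \"./ProxyAdmin.sol\";"

def Spec_rewrite_known_imports (sol_source : String) (out : String) : Prop :=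
  out = rewrite_known_imports_alt sol_source
instance (sol_source : String) (out : String) : Decidable (Spec_rewrite_known_imports sol_source out) := by
  unfold Spec_rewrite_known_imports; infer_instance

-- ===== CLAIM (what is proved, stated in full; the proofs are below) =====
def Claim_equal_rewrite_known_imports : Prop :=
  ∀ (sol_source : String), Dom_rewrite_known_imports sol_source →
    Pre_rewrite_known_imports sol_source →
    Spec_rewrite_known_imports sol_source (rewrite_known_imports sol_source)

-- ===== LEMMAS AND PROOFS =====

-- structural model of CPython str.replace (nonempty pattern): scan, replace, skip
def rep1 (old new : List Char) : List Char → List Char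
  | [] => []
  | c :: t =>
    if h : old.isPrefixOf (c :: t) = true ∧ old ≠ [] then
      new ++ rep1 old new ((c :: t).drop old.length)
    else c :: rep1 old new t
termination_by l => l.length
decreasing_by
  · have : 1 ≤ old.length := by
      cases old with
      | nil => exact absurd rfl h.2
      | cons a b => simp
    simp only [List.length_drop, List.length_cons]
    omega
  · simp

-- token decomposition of the input by the scan: literal chars and matched patterns
inductive Tok where
  | lit : Char → Tok
  | rep : List Char → List Char → Tok
deriving DecidableEq, Repr

def toks : List Char → List Tok
  | [] => []
  | c :: t =>
    match h : qpats.find? (fun pr => pr.1.isPrefixOf (c :: t)) with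
    | some pr => .rep pr.1 pr.2 :: toks ((c :: t).drop pr.1.length)
    | none => .lit c :: toks t
termination_by l => l.length
decreasing_by
  · have h1 := qpats_fst_len _ (List.mem_of_find?_eq_some h)
    simp only [List.length_drop, List.length_cons]
    omega
  · simp

-- render a token list, replacing exactly the patterns processed so far (the list L)
def renderL (L : List (List Char × List Char)) : List Tok → List Char
  | [] => []
  | .lit c :: ts => c :: renderL L ts
  | .rep p r :: ts => (if (p, r) ∈ L then r else p) ++ renderL L ts

-- no-overlap of pattern occurrences, on char lists (unbounded-index form of Pre_)
def NoOv (s : List Char) : Prop :=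
  ∀ i, ∀ p ∈ qpats, ∀ q ∈ qpats,
    p.1 <+: s.drop i → ¬ q.1 <+: s.drop (i + p.1.length - 1)

def isQ (c : Char) : Bool := c == '"' || c == '\''

-- shape of (suffixes of) patterns: no '@', quotes only at the ends
def wOK (w : List Char) : Prop :=
  '@' ∉ w ∧ ∀ j, 1 ≤ j → j + 1 < w.length → isQ w[j]! = false

-- ===== literal facts about the 34 patterns (by decide) =====
lemma fact_len : ∀ pr ∈ qpats, 2 ≤ pr.1.length ∧ 2 ≤ pr.2.length := by decide
lemma fact_head : ∀ pr ∈ qpats, pr.2[0]! = pr.1[0]! ∧ isQ pr.1[0]! = true := by decide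
lemma fact_last : ∀ pr ∈ qpats,
    pr.1[pr.1.length - 1]! = pr.1[0]! ∧ pr.2[pr.2.length - 1]! = pr.1[0]! := by decide
lemma fact_interior₁ : ∀ pr ∈ qpats, ∀ j < pr.1.length, 1 ≤ j → j + 1 < pr.1.length →
    isQ pr.1[j]! = false := by decide
lemma fact_interior₂ : ∀ pr ∈ qpats, ∀ j < pr.2.length, 1 ≤ j → j + 1 < pr.2.length →
    isQ pr.2[j]! = false := by decide
lemma fact_at : ∀ pr ∈ qpats, '@' ∉ pr.1 := by decide
lemma fact_rep_at : ∀ pr ∈ qpats, pr.2[1]! = '@' := by decide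
lemma fact_prefix_free : ∀ p ∈ qpats, ∀ q ∈ qpats, p.1.isPrefixOf q.1 = true → p = q := by decide
lemma fact_nodup : qpats.Nodup := by decide

-- ===== basic bridges =====
lemma pre_noov {s : String} (h : Pre_rewrite_known_imports s) : NoOv s.toList := by
  intro i p hp q hq hpre hqre
  by_cases hi : i < s.toList.length
  · have := h i hi p hp q hq ((List.isPrefixOf_iff_prefix).mpr hpre)
    rw [(List.isPrefixOf_iff_prefix).mpr hqre] at this
    exact Bool.true_eq_false.mp this
  · have h0 : p.1 = [] := by
      simpa [List.drop_eq_nil_of_le (le_of_not_gt hi)] using hpre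
    have := (fact_len p hp).1
    simp [h0] at this

lemma noov_drop {s : List Char} (h : NoOv s) (k : ℕ) : NoOv (s.drop k) := by
  intro i p hp q hq hpre hqre
  rw [List.drop_drop] at hpre hqre
  have h2 := (fact_len p hp).1
  have hpre' : p.1 <+: List.drop (k + i) s := hpre
  have := h (k + i) p hp q hq hpre'
  apply this
  have he : k + (i + p.1.length - 1) = k + i + p.1.length - 1 := by omega
  rwa [he] at hqre

-- unfolding lemmas
lemma toks_nil : toks [] = [] := by rw [toks]
lemma toks_cons_some {c t pr} (h : qpats.find? (fun pr => pr.1.isPrefixOf (c :: t)) = some pr) :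
    toks (c :: t) = .rep pr.1 pr.2 :: toks ((c :: t).drop pr.1.length) := by
  rw [toks, h]
lemma toks_cons_none {c t} (h : qpats.find? (fun pr => pr.1.isPrefixOf (c :: t)) = none) :
    toks (c :: t) = .lit c :: toks t := by
  rw [toks, h]
lemma subScan_nil : subScan [] = [] := by rw [subScan]
lemma subScan_cons_some {c t pr} (h : qpats.find? (fun pr => pr.1.isPrefixOf (c :: t)) = some pr) :
    subScan (c :: t) = pr.2 ++ subScan ((c :: t).drop pr.1.length) := by
  rw [subScan, h]
lemma subScan_cons_none {c t} (h : qpats.find? (fun pr => pr.1.isPrefixOf (c :: t)) = none) :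
    subScan (c :: t) = c :: subScan t := by
  rw [subScan, h]
lemma rep1_nil (old new : List Char) : rep1 old new [] = [] := by rw [rep1]
lemma rep1_cons_pos {old} (new : List Char) {c t} (h : old.isPrefixOf (c :: t) = true)
    (hne : old ≠ []) :
    rep1 old new (c :: t) = new ++ rep1 old new ((c :: t).drop old.length) := by
  rw [rep1, dif_pos ⟨h, hne⟩]
lemma rep1_cons_neg {old} (new : List Char) {c t} (h : ¬ old.isPrefixOf (c :: t) = true) :
    rep1 old new (c :: t) = c :: rep1 old new t := by
  rw [rep1, dif_neg (by tauto)]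

-- ===== the key structural lemmas =====

lemma find?_prefix {c : Char} {t : List Char} {pr : List Char × List Char}
    (h : qpats.find? (fun pr => pr.1.isPrefixOf (c :: t)) = some pr) :
    pr.1 ++ (c :: t).drop pr.1.length = c :: t := by
  have hb := List.find?_some h
  simp only at hb
  obtain ⟨u, hu⟩ := (List.isPrefixOf_iff_prefix).mp hb
  rw [← hu, List.drop_left]

lemma wOK_of_mem {q rq : List Char} (h : (q, rq) ∈ qpats) : wOK q :=
  ⟨fact_at _ h, fun j h1 h2 => fact_interior₁ _ h j (by simp only; omega) h1 h2⟩

lemma wOK_tail {a : Char} {w : List Char} (h : wOK (a :: w)) : wOK w := by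
  refine ⟨fun hm => h.1 (List.mem_cons_of_mem _ hm), fun j h1 h2 => ?_⟩
  have := h.2 (j + 1) (by omega) (by simp; omega)
  rwa [List.getElem!_cons_succ] at this

-- heads of pattern-lists
lemma exists_cons_cons_of_len {l : List Char} (h : 2 ≤ l.length) :
    ∃ a b t, l = a :: b :: t := by
  cases l with
  | nil => simp at h
  | cons a l' =>
    cases l' with
    | nil => simp at h
    | cons b t => exact ⟨a, b, t, rfl⟩

-- a pattern-shaped word matching the partially-replaced rendering matches the original
lemma prefix_render : ∀ s L (w : List Char), wOK w → w <+: renderL L (toks s) → w <+: s := by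
  intro s
  induction s using toks.induct with
  | case1 =>
    intro L w _ hp
    rw [toks_nil] at hp
    simp only [renderL, List.prefix_nil] at hp
    simp [hp]
  | case2 c t pr h ih =>
    intro L w hw hp
    rw [toks_cons_some h] at hp
    have hmem : pr ∈ qpats := List.mem_of_find?_eq_some h
    have hsplit := find?_prefix h
    have hlen2 := fact_len pr hmem
    have hppre : pr.1 <+: c :: t := ⟨_, hsplit⟩
    simp only [renderL] at hp
    by_cases hL : (pr.1, pr.2) ∈ L
    · -- rendered as the replacement: w can only reach its opening quote
      rw [if_pos hL] at hp
      obtain ⟨r0, r1, rtl, hr⟩ := exists_cons_cons_of_len hlen2.2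
      match w, hp with
      | [], _ => exact List.nil_prefix
      | [a], hp =>
        have : a = r0 := by
          rw [hr] at hp
          exact (List.cons_prefix_cons.mp hp).1
        have hr0 : pr.2[0]! = r0 := by rw [hr]; simp
        have hp00 : pr.1[0]! = c := by
          rw [getElem!_pos pr.1 0 (by omega)]
          exact List.IsPrefix.getElem hppre (i := 0) (by omega)
        have hac : a = c := by
          rw [this, ← hr0, (fact_head pr hmem).1, hp00]
        exact List.cons_prefix_cons.mpr ⟨hac, List.nil_prefix⟩
      | a :: b :: w', hp =>
        exfalso
        rw [hr] at hp
        have h1 := (List.cons_prefix_cons.mp hp).2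
        have h2 := (List.cons_prefix_cons.mp h1).1
        have hat := fact_rep_at pr hmem
        rw [hr] at hat
        simp at hat
        exact hw.1 (by rw [h2, hat]; exact List.mem_cons_of_mem _ (List.mem_cons_self ..))
    · -- rendered as the original pattern
      rw [if_neg hL] at hp
      by_cases hwl : w.length ≤ pr.1.length
      · -- w is a prefix of the pattern, hence of the original
        have hwp : w <+: pr.1 := by
          have := List.prefix_iff_eq_take.mp hp
          rw [List.take_append_of_le_length hwl] at this
          rw [this]
          exact List.take_prefix _ _
        exact hwp.trans hppre
      · exfalso
        have hpw : pr.1 <+: w :=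
          List.prefix_of_prefix_length_le (List.prefix_append _ _) hp (by omega)
        set j := pr.1.length - 1 with hj
        have hjw : j < w.length := by omega
        have hwj : w[j]! = pr.1[j]! := by
          rw [getElem!_pos w j hjw, getElem!_pos pr.1 j (show j < pr.1.length by omega)]
          exact (List.IsPrefix.getElem hpw (by omega)).symm
        have hlast := (fact_last pr hmem).1
        have hhead := (fact_head pr hmem).2
        have := hw.2 j (by omega) (by omega)
        rw [hwj, hj, hlast] at this
        rw [hhead] at this
        exact Bool.true_eq_false.mp this
  | case3 c t h ih =>
    intro L w hw hp
    rw [toks_cons_none h] at hp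
    simp only [renderL] at hp
    cases w with
    | nil => exact List.nil_prefix
    | cons a w' =>
      obtain ⟨hac, hw'⟩ := List.cons_prefix_cons.mp hp
      subst hac
      exact List.cons_prefix_cons.mpr ⟨rfl, ih L w' (wOK_tail hw) hw'⟩

-- pushing a replace pass through a region it cannot match in
lemma rep1_append (q rq : List Char) : ∀ u X, (∀ j, j < u.length → ¬ q <+: (u.drop j ++ X)) →
    rep1 q rq (u ++ X) = u ++ rep1 q rq X := by
  intro u
  induction u with
  | nil => intro X _; simp
  | cons a u' ih =>
    intro X hno
    have h0 : ¬ q.isPrefixOf (a :: (u' ++ X)) = true := by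
      intro hcon
      exact hno 0 (by simp) (by simpa using (List.isPrefixOf_iff_prefix).mp hcon)
    rw [List.cons_append, rep1_cons_neg rq h0,
      ih X (fun j hj hc => hno (j + 1) (by simp; omega) (by simpa using hc))]
    rfl

-- one replace pass advances the processed set by one pair
lemma rep1_renderL {q rq : List Char} (hq : (q, rq) ∈ qpats) :
    ∀ s, NoOv s → ∀ L, (q, rq) ∉ L →
      rep1 q rq (renderL L (toks s)) = renderL (L ++ [(q, rq)]) (toks s) := by
  intro s
  induction s using toks.induct with
  | case1 =>
    intro _ L _
    rw [toks_nil]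
    simp only [renderL, rep1_nil]
  | case3 c t h ih =>
    intro hno L hnotin
    rw [toks_cons_none h]
    simp only [renderL]
    have hq0 : ¬ q.isPrefixOf (c :: renderL L (toks t)) = true := by
      intro hcon
      have : q <+: renderL L (toks (c :: t)) := by
        rw [toks_cons_none h]
        simpa [renderL] using (List.isPrefixOf_iff_prefix).mp hcon
      have hqct : q <+: c :: t := prefix_render _ L q (wOK_of_mem hq) this
      have := List.find?_eq_none.mp h (q, rq) hq
      simp only at this
      exact this ((List.isPrefixOf_iff_prefix).mpr hqct)
    rw [rep1_cons_neg rq hq0]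
    have hnot : NoOv t := by
      have := noov_drop hno 1
      simpa using this
    rw [ih hnot L hnotin]
  | case2 c t pr h ih =>
    intro hno L hnotin
    have hmem : pr ∈ qpats := List.mem_of_find?_eq_some h
    have hsplit := find?_prefix h
    have hlenp := fact_len pr hmem
    have hlenq := fact_len (q, rq) hq
    have hppre : pr.1 <+: c :: t := ⟨_, hsplit⟩
    have hno' : NoOv ((c :: t).drop pr.1.length) := noov_drop hno _
    rw [toks_cons_some h]
    simp only [renderL]
    by_cases heq : pr = (q, rq)
    · have hprL : (pr.1, pr.2) ∉ L := by
        intro hin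
        exact hnotin (by rw [← heq]; simpa using hin)
      rw [if_neg hprL, if_pos (by rw [heq]; exact List.mem_append_right _ (by simp))]
      have hq1 : pr.1 = q := by rw [heq]
      have hrq1 : pr.2 = rq := by rw [heq]
      rw [hq1, hrq1]
      obtain ⟨q0, q1', qtl, hqd0⟩ := exists_cons_cons_of_len hlenq.1
      have hqd : q = q0 :: q1' :: qtl := hqd0
      have hpre : q.isPrefixOf (q ++ renderL L (toks ((c :: t).drop q.length))) = true :=
        (List.isPrefixOf_iff_prefix).mpr (List.prefix_append _ _)
      rw [hqd, List.cons_append,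
        rep1_cons_pos rq (by rw [← List.cons_append, ← hqd]; exact (hq1 ▸ hpre)) (by simp),
        ← List.cons_append, ← hqd, List.drop_left]
      have ih' := ih hno' L hnotin
      rw [hq1] at ih'
      rw [ih']
    · have hnn : ¬ (pr.1, pr.2) = (q, rq) := fun hcc => heq (by rw [← hcc])
      have hiteeq : (if (pr.1, pr.2) ∈ L ++ [(q, rq)] then pr.2 else pr.1)
          = (if (pr.1, pr.2) ∈ L then pr.2 else pr.1) := by
        by_cases hL : (pr.1, pr.2) ∈ L
        · rw [if_pos hL, if_pos (List.mem_append_left _ hL)]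
        · rw [if_neg hL, if_neg (by
            intro hcc
            rcases List.mem_append.mp hcc with h1 | h1
            · exact hL h1
            · exact hnn (by simpa using h1))]
      rw [hiteeq]
      set u := if (pr.1, pr.2) ∈ L then pr.2 else pr.1 with hu
      set X := renderL L (toks ((c :: t).drop pr.1.length)) with hX
      have hu2 : 2 ≤ u.length := by
        rw [hu]; split <;> omega
      obtain ⟨q0, q1, qtl, hqd0⟩ := exists_cons_cons_of_len hlenq.1
      have hqd : q = q0 :: q1 :: qtl := hqd0
      have hustep : ∀ j, j < u.length → ¬ q <+: (u.drop j ++ X) := by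
        intro j hj hcon
        by_cases hj0 : j = 0
        · subst hj0
          simp only [List.drop_zero] at hcon
          by_cases hL : (pr.1, pr.2) ∈ L
          · have hueq : u = pr.2 := by rw [hu, if_pos hL]
            obtain ⟨r0, r1, rtl, hr⟩ := exists_cons_cons_of_len hlenp.2
            rw [hueq, hr, hqd] at hcon
            obtain ⟨h0, h1, -⟩ : q0 = r0 ∧ q1 = r1 ∧ qtl <+: rtl ++ X := by simpa using hcon
            have hat := fact_rep_at pr hmem
            rw [hr] at hat
            simp at hat
            exact (fact_at _ hq) (by
              rw [hqd]
              exact List.mem_cons_of_mem _ (by rw [h1, hat]; exact List.mem_cons_self ..))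
          · have hueq : u = pr.1 := by rw [hu, if_neg hL]
            rw [hueq] at hcon
            by_cases hlq : q.length ≤ pr.1.length
            · have hqp : q <+: pr.1 := by
                have := List.prefix_iff_eq_take.mp hcon
                rw [List.take_append_of_le_length hlq] at this
                rw [this]
                exact List.take_prefix _ _
              have := fact_prefix_free (q, rq) hq pr hmem ((List.isPrefixOf_iff_prefix).mpr hqp)
              exact heq this.symm
            · have hpq : pr.1 <+: q :=
                List.prefix_of_prefix_length_le (List.prefix_append _ _) hcon (by omega)
              have := fact_prefix_free pr hmem (q, rq) hq ((List.isPrefixOf_iff_prefix).mpr hpq)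
              exact heq this
        by_cases hjl : j = u.length - 1
        · -- last char of the token: a match here overlaps the pattern occurrence: NoOv
          have hdrop : u.drop j = [u[j]'(by omega)] := by
            rw [List.drop_eq_getElem_cons (by omega), List.drop_eq_nil_of_le (by omega)]
          rw [hdrop, List.cons_append, List.nil_append, hqd] at hcon
          obtain ⟨hq0, hqrest⟩ := List.cons_prefix_cons.mp hcon
          have hwq : wOK (q1 :: qtl) := wOK_tail (hqd ▸ wOK_of_mem hq)
          have hq1t : (q1 :: qtl) <+: (c :: t).drop pr.1.length :=
            prefix_render _ L _ hwq hqrest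
          have hul : u[j]! = pr.1[0]! := by
            rw [hu] at *
            by_cases hL : (pr.1, pr.2) ∈ L
            · rw [if_pos hL] at *
              rw [hjl, getElem!_pos pr.2 _ (by omega)] at *
              have := (fact_last pr hmem).2
              rwa [getElem!_pos pr.2 _ (by omega)] at this
            · rw [if_neg hL] at *
              rw [hjl, getElem!_pos pr.1 _ (by omega)] at *
              have := (fact_last pr hmem).1
              rwa [getElem!_pos pr.1 _ (by omega)] at this
          have hkey : q <+: (c :: t).drop (pr.1.length - 1) := by
            have hd : (c :: t).drop (pr.1.length - 1)
                = pr.1[pr.1.length - 1]'(by omega) :: (c :: t).drop pr.1.length := by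
              conv_lhs => rw [← hsplit]
              rw [List.drop_append_of_le_length (by omega),
                List.drop_eq_getElem_cons (show pr.1.length - 1 < pr.1.length by omega),
                show pr.1.length - 1 + 1 = pr.1.length by omega, List.drop_length]
              rfl
            rw [hd, hqd]
            refine List.cons_prefix_cons.mpr ⟨?_, hq1t⟩
            have h1 : q0 = u[j]'(by omega) := hq0
            have h2 : u[j]! = u[j]'(by omega) := getElem!_pos u j (by omega)
            have h3 : pr.1[pr.1.length - 1]! = pr.1[0]! := (fact_last pr hmem).1
            rw [getElem!_pos pr.1 _ (by omega)] at h3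
            rw [h1, ← h2, hul, ← h3]
          have hp0 : pr.1 <+: (c :: t).drop 0 := by simpa using hppre
          have := hno 0 pr hmem (q, rq) hq hp0
          rw [show 0 + pr.1.length - 1 = pr.1.length - 1 by omega] at this
          exact this hkey
        · -- interior char of the token: not a quote, so no pattern starts here
          have h1j : 1 ≤ j := by omega
          have hj1 : j + 1 < u.length := by omega
          rw [List.drop_eq_getElem_cons (by omega), List.cons_append, hqd] at hcon
          have hq0 := (List.cons_prefix_cons.mp hcon).1
          have hqq : isQ q[0]! = true := (fact_head (q, rq) hq).2
          have huj : isQ u[j]! = false := by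
            rw [hu] at *
            by_cases hL : (pr.1, pr.2) ∈ L
            · rw [if_pos hL] at *
              exact fact_interior₂ pr hmem j (by omega) h1j (by omega)
            · rw [if_neg hL] at *
              exact fact_interior₁ pr hmem j (by omega) h1j (by omega)
          rw [hqd] at hqq
          simp only [List.getElem!_cons_zero] at hqq
          rw [getElem!_pos u j (by omega), ← hq0] at huj
          rw [hqq] at huj
          exact Bool.true_eq_false.mp huj
      calc rep1 q rq (u ++ X) = u ++ rep1 q rq X := rep1_append q rq u X hustep
        _ = u ++ renderL (L ++ [(q, rq)]) (toks ((c :: t).drop pr.1.length)) := by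
            rw [hX, ih hno' L hnotin]

lemma renderL_nil_toks : ∀ s, renderL [] (toks s) = s := by
  intro s
  induction s using toks.induct with
  | case1 => rw [toks_nil]; rfl
  | case2 c t pr h ih =>
    rw [toks_cons_some h]
    simp only [renderL, List.not_mem_nil, if_false]
    rw [ih, find?_prefix h]
  | case3 c t h ih =>
    rw [toks_cons_none h]
    simp only [renderL, ih]

lemma subScan_renderL : ∀ s, subScan s = renderL qpats (toks s) := by
  intro s
  induction s using toks.induct with
  | case1 => rw [toks_nil, subScan_nil]; rfl
  | case2 c t pr h ih =>
    rw [toks_cons_some h, subScan_cons_some h]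
    have hm : pr ∈ qpats := List.mem_of_find?_eq_some h
    simp only [renderL, if_pos (show (pr.1, pr.2) ∈ qpats from hm), ih]
  | case3 c t h ih =>
    rw [toks_cons_none h, subScan_cons_none h]
    simp only [renderL, ih]

-- the whole sequential fold = full rendering
lemma fold_renderL : ∀ (Ls Lp : List (List Char × List Char)), Lp ++ Ls = qpats →
    ∀ s, NoOv s →
    Ls.foldl (fun acc pr => rep1 pr.1 pr.2 acc) (renderL Lp (toks s)) = renderL qpats (toks s) := by
  intro Ls
  induction Ls with
  | nil => intro Lp heq s _; simp at heq; rw [heq, List.foldl_nil]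
  | cons pr Ls' ih =>
    intro Lp heq s hno
    have hnd : (Lp ++ pr :: Ls').Nodup := heq ▸ fact_nodup
    rw [List.nodup_append] at hnd
    have hmem : pr ∈ qpats := heq ▸ List.mem_append_right _ (List.mem_cons_self ..)
    have hnotin : pr ∉ Lp := fun hin =>
      hnd.2.2 pr hin pr (List.mem_cons_self ..) rfl
    simp only [List.foldl_cons]
    rw [show rep1 pr.1 pr.2 (renderL Lp (toks s)) = renderL (Lp ++ [pr]) (toks s) from
      rep1_renderL hmem s hno Lp hnotin]
    exact ih (Lp ++ [pr]) (by simpa using heq) s hno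

-- ===== bridging PySem.Chars.replace to rep1 =====
lemma go_zero (old new l acc : List Char) :
    PySem.Chars.replace.go old new 0 l acc = acc.reverse ++ l := by
  cases l
  · rw [PySem.Chars.replace.go.eq_def]
  · rw [PySem.Chars.replace.go.eq_def]

lemma go_nil (old new acc : List Char) (fuel : ℕ) :
    PySem.Chars.replace.go old new (fuel + 1) [] acc = acc.reverse := by
  rw [PySem.Chars.replace.go.eq_def]

lemma go_cons (old new acc : List Char) (fuel : ℕ) (c : Char) (t : List Char) :
    PySem.Chars.replace.go old new (fuel + 1) (c :: t) acc =
      if old.isPrefixOf (c :: t) = true then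
        PySem.Chars.replace.go old new fuel (List.drop old.length (c :: t)) (new.reverse ++ acc)
      else PySem.Chars.replace.go old new fuel t (c :: acc) := by
  rw [PySem.Chars.replace.go.eq_def]

lemma go_eq (old new : List Char) (hne : old ≠ []) :
    ∀ fuel l acc, l.length ≤ fuel →
      PySem.Chars.replace.go old new fuel l acc = acc.reverse ++ rep1 old new l := by
  have hol : 1 ≤ old.length := by
    cases old with
    | nil => exact absurd rfl hne
    | cons a b => simp
  intro fuel
  induction fuel with
  | zero =>
    intro l acc hl
    have : l = [] := List.eq_nil_of_length_eq_zero (by omega)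
    subst this
    rw [go_zero, rep1_nil]
  | succ fuel ih =>
    intro l acc hl
    cases l with
    | nil => rw [go_nil, rep1_nil]; simp
    | cons c t =>
      rw [go_cons]
      simp only [List.length_cons] at hl
      by_cases hp : old.isPrefixOf (c :: t) = true
      · rw [if_pos hp, rep1_cons_pos new hp hne,
          ih _ _ (by simp only [List.length_drop, List.length_cons]; omega)]
        simp
      · rw [if_neg hp, rep1_cons_neg new hp, ih _ _ (by omega)]
        simp

lemma chars_replace_eq_rep1 (old new s : List Char) (hne : old ≠ []) :
    PySem.Chars.replace s old new = rep1 old new s := by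
  rw [PySem.Chars.replace]
  rw [if_neg (by simpa [List.isEmpty_iff] using hne)]
  simpa using go_eq old new hne s.length s [] le_rfl

lemma A_fold : ∀ (L : List (String × String)) (x : String),
    (L.foldl (fun out pr =>
      PySem.Str.replace
        (PySem.Str.replace out ("\"" ++ pr.1 ++ "\"") ("\"" ++ pr.2 ++ "\""))
        ("'" ++ pr.1 ++ "'") ("'" ++ pr.2 ++ "'")) x).toList
    = (L.flatMap (fun pr =>
        [('"' :: pr.1.toList ++ ['"'], '"' :: pr.2.toList ++ ['"']),
         ('\'' :: pr.1.toList ++ ['\''], '\'' :: pr.2.toList ++ ['\''])])).foldl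
        (fun acc pr => rep1 pr.1 pr.2 acc) x.toList := by
  intro L
  induction L with
  | nil => intro x; simp
  | cons pr L ih =>
    intro x
    simp only [List.foldl_cons, List.flatMap_cons, List.foldl_append]
    rw [ih]
    congr 1
    simp only [List.foldl_nil]
    rw [PySem.Str.toList_replace, PySem.Str.toList_replace]
    have h1 : ("\"" ++ pr.1 ++ "\"").toList = '"' :: pr.1.toList ++ ['"'] := by simp
    have h2 : ("\"" ++ pr.2 ++ "\"").toList = '"' :: pr.2.toList ++ ['"'] := by simp
    have h3 : ("'" ++ pr.1 ++ "'").toList = '\'' :: pr.1.toList ++ ['\''] := by simp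
    have h4 : ("'" ++ pr.2 ++ "'").toList = '\'' :: pr.2.toList ++ ['\''] := by simp
    rw [h1, h2, h3, h4, chars_replace_eq_rep1 _ _ _ (by simp),
      chars_replace_eq_rep1 _ _ _ (by simp)]

-- ===== VERDICT (by name: the statement is the Claim_ definition above) =====
theorem rewrite_known_imports_spec : Claim_equal_rewrite_known_imports := by
  unfold Claim_equal_rewrite_known_imports
  intro s _hDom hPre
  unfold Spec_rewrite_known_imports rewrite_known_imports rewrite_known_imports_alt
  by_cases hs : s == ""
  · rw [if_pos hs, if_pos hs]
  · rw [if_neg hs, if_neg hs]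
    apply String.toList_inj.mp
    rw [A_fold ozRewrites s]
    have hqp : (ozRewrites.flatMap (fun pr =>
        [('"' :: pr.1.toList ++ ['"'], '"' :: pr.2.toList ++ ['"']),
         ('\'' :: pr.1.toList ++ ['\''], '\'' :: pr.2.toList ++ ['\''])])) = qpats := rfl
    rw [hqp]
    have h0 := fold_renderL qpats [] rfl s.toList (pre_noov hPre)
    rw [renderL_nil_toks] at h0
    rw [h0, ← subScan_renderL, String.toList_ofList]
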